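-- pv_equiv track=rewrite | github.com/jfcherng-sublime/ST-AutoSetSyntax | plugin/helpers.py | resolve_magika_label_with_syntax_map
-- ===== SOURCE A (Python) =====
-- from collections import deque
--
-- def resolve_magika_label_with_syntax_map(label: str, syntax_map: dict[str, list[str]]) -> list[str]:
--     # note that dict is insertion-ordered (since Python 3.7)
--     res: dict[str, bool] = {}
--
--     deq = deque(syntax_map.get(label, []))
--     while deq:
--         if (notation := deq.popleft()) in res:
--             continue
--         res[notation] = False  # visited
--
--         # notation is in the form of "scope:text.xml" or "=xml"
--         scope, _, ref = notation.partition("=")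
--
--         if ref:
--             deq.extendleft(reversed(syntax_map.get(ref, [])))
--         else:
--             res[scope] = True  # parsed
--
--     return [scope for scope, is_parsed in res.items() if is_parsed]
-- ===== SOURCE B (Python) =====
-- def resolve_magika_label_with_syntax_map(label: str, syntax_map: dict[str, list[str]]) -> list[str]:
--     # Single recursive DFS that carries a visited *set* and an output *list* directly,
--     # instead of A's deque worklist over a bool-valued dict that is filtered afterwards.
--     seen: set[str] = set()
--     out: list[str] = []
--
--     def visit(notation: str) -> None:
--         if notation in seen:
--             return
--         seen.add(notation)
--         if "=" in notation:
--             scope, ref = notation.split("=", 1)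
--             if ref:
--                 for child in syntax_map.get(ref, []):
--                     visit(child)
--             elif scope not in seen:
--                 seen.add(scope)
--                 out.append(scope)
--         else:
--             out.append(notation)
--
--     for notation in syntax_map.get(label, []):
--         visit(notation)
--
--     return out
-- ===== Notes on version B (the rewrite author's own statement) =====
-- stated objective: alternative
-- what changed: A's explicit deque worklist over a bool-valued dict (marked False on visit, True on parse, filtered at the end) is replaced by a recursive DFS that carries a visited set and appends parsed scopes to the output list directly, so the dict and the final filtering pass disappear.
import Mathlib
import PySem

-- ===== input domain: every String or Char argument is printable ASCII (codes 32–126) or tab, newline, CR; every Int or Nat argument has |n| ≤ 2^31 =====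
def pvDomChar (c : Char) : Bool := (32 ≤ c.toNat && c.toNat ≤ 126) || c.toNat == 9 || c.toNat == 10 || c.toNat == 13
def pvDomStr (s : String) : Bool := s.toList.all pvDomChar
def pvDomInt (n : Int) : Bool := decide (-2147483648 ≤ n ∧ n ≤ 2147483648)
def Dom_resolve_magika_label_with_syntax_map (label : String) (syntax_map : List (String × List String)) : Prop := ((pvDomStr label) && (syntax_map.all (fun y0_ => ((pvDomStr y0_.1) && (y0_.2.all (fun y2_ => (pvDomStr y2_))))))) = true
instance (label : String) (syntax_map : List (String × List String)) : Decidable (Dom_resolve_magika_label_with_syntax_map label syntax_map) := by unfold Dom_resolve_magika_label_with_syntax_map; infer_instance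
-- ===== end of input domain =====

-- B replaces A's deque worklist over a bool-valued dict (filtered at the end) by a recursive DFS
-- that carries a visited set and builds the output list directly (objective: alternative, same cost).

-- ===== PORT A =====
-- syntax_map.get(key, []) on the association list (first match)
def pvLookup : List (String × List String) → String → List String
  | [], _ => []
  | (k, v) :: rest, key => if k == key then v else pvLookup rest key

-- notation.partition("=") without the middle component (A only uses scope, ref and ref's truthiness); exact for the single-char separator '='
def pvPart (n : String) : String × String :=
  (String.ofList (n.toList.takeWhile (fun c => c ≠ '=')),
   String.ofList ((n.toList.dropWhile (fun c => c ≠ '=')).drop 1))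

-- all strings occurring in the dict's value lists: a bound for the fuel (every deque element / recursion key comes from here)
def pvAllVals (m : List (String × List String)) : List String := m.flatMap (·.2)

def pvSz (m : List (String × List String)) : Nat := (pvAllVals m).length

-- the 'while deq:' loop of A; fuel is an upper bound on the number of iterations, proved sufficient below
def pvLoopA (m : List (String × List String)) : Nat → List String → PySem.Dict String Bool → PySem.Dict String Bool
  | 0, _, res => res
  | _ + 1, [], res => res
  | f + 1, n :: rest, res =>
    if res.contains n then pvLoopA m f rest res
    else
      let res1 := res.insert n false
      let p := pvPart n
      if p.2 = "" then pvLoopA m f rest (res1.insert p.1 true)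
      else pvLoopA m f (pvLookup m p.2 ++ rest) res1   -- deq.extendleft(reversed(children))

def resolve_magika_label_with_syntax_map (label : String) (syntax_map : List (String × List String)) : List String :=
  let res := pvLoopA syntax_map (pvSz syntax_map + pvSz syntax_map * (pvSz syntax_map + 1))
               (pvLookup syntax_map label) PySem.Dict.empty
  (res.items.filter (fun p => p.2)).map (·.1)

-- ===== PORT B =====
-- '"=" in notation' together with notation.split("=", 1): none = no '='; some (s, r) = the parts around the FIRST '='
def pvSplit1 : List Char → Option (List Char × List Char)
  | [] => none
  | c :: rest => if c = '=' then some ([], rest) else (pvSplit1 rest).map (fun p => (c :: p.1, p.2))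

-- the recursive 'visit' of B over the state (seen set, output list); fuel bounds the depth, proved sufficient below
def pvVisit (m : List (String × List String)) : Nat → PySem.Set String × List String → String → PySem.Set String × List String
  | 0, st, _ => st
  | f + 1, st, n =>
    if PySem.Set.contains st.1 n then st
    else
      let seen1 := PySem.Set.add st.1 n
      match pvSplit1 n.toList with
      | some (s, r) =>
          if r ≠ [] then
            ((PySem.Dict.mk m).getD (String.ofList r) []).foldl (pvVisit m f) (seen1, st.2)
          else
            let scope := String.ofList s
            if PySem.Set.contains seen1 scope then (seen1, st.2)
            else (PySem.Set.add seen1 scope, st.2 ++ [scope])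
      | none => (seen1, st.2 ++ [n])

def resolve_magika_label_with_syntax_map_alt (label : String) (syntax_map : List (String × List String)) : List String :=
  (((PySem.Dict.mk syntax_map).getD label []).foldl
      (pvVisit syntax_map (pvSz syntax_map + 1)) (PySem.Set.empty, [])).2

-- ===== PRECONDITION & SPEC =====
def Spec_resolve_magika_label_with_syntax_map (label : String) (syntax_map : List (String × List String)) (out : List String) : Prop := out = resolve_magika_label_with_syntax_map_alt label syntax_map
instance (label : String) (syntax_map : List (String × List String)) (out : List String) : Decidable (Spec_resolve_magika_label_with_syntax_map label syntax_map out) := by unfold Spec_resolve_magika_label_with_syntax_map; infer_instance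

-- ===== CLAIM (what is proved, stated in full; the proofs are below) =====
def Claim_equal_resolve_magika_label_with_syntax_map : Prop := ∀ (label : String) (syntax_map : List (String × List String)), Dom_resolve_magika_label_with_syntax_map label syntax_map → Spec_resolve_magika_label_with_syntax_map label syntax_map (resolve_magika_label_with_syntax_map label syntax_map)

-- ===== LEMMAS AND PROOFS =====

-- proof-side intermediate: A's worklist loop re-expressed as a recursive visit over the SAME dict
def pvVisitB (m : List (String × List String)) : Nat → PySem.Dict String Bool → String → PySem.Dict String Bool
  | 0, res, _ => res
  | f + 1, res, n =>
    if res.contains n then res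
    else
      let res1 := res.insert n false
      let p := pvPart n
      if p.2 = "" then res1.insert p.1 true
      else (pvLookup m p.2).foldl (pvVisitB m f) res1

-- number of dict-value strings not yet visited: the termination/fuel measure
def pvUnvis (m : List (String × List String)) (res : PySem.Dict String Bool) : Nat :=
  ((pvAllVals m).dedup.filter (fun x => !(res.contains x))).length

lemma pvLookup_subset (m : List (String × List String)) (key : String) :
    ∀ x ∈ pvLookup m key, x ∈ pvAllVals m := by
  induction m with
  | nil => intro x hx; cases hx
  | cons p rest ih =>
      obtain ⟨k, v⟩ := p
      intro x hx
      simp only [pvLookup] at hx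
      simp only [pvAllVals, List.flatMap_cons, List.mem_append]
      by_cases h : k == key
      · rw [if_pos h] at hx; exact Or.inl hx
      · rw [if_neg h] at hx; exact Or.inr (ih x hx)

lemma pvLookup_length_le (m : List (String × List String)) (key : String) :
    (pvLookup m key).length ≤ pvSz m := by
  induction m with
  | nil => simp [pvLookup, pvSz, pvAllVals]
  | cons p rest ih =>
      obtain ⟨k, v⟩ := p
      simp only [pvLookup, pvSz, pvAllVals, List.flatMap_cons, List.length_append]
      by_cases h : k == key
      · rw [if_pos h]; omega
      · rw [if_neg h]
        have := ih
        simp only [pvSz, pvAllVals] at this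
        omega

lemma foldl_pres {α β : Type} (P : β → Prop) (step : β → α → β)
    (h : ∀ b a, P b → P (step b a)) : ∀ (l : List α) (b : β), P b → P (l.foldl step b) := by
  intro l
  induction l with
  | nil => intro b hb; exact hb
  | cons x xs ih => intro b hb; exact ih _ (h b x hb)

lemma visitB_contains_mono (m : List (String × List String)) :
    ∀ (f : Nat) (res : PySem.Dict String Bool) (n x : String),
      res.contains x = true → (pvVisitB m f res n).contains x = true := by
  intro f
  induction f with
  | zero => intro res n x hx; simpa [pvVisitB] using hx
  | succ f ih =>
      intro res n x hx
      simp only [pvVisitB]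
      by_cases hc : res.contains n = true
      · rw [if_pos hc]; exact hx
      · rw [if_neg hc]
        by_cases hp : (pvPart n).2 = ""
        · rw [if_pos hp]
          simp [PySem.Dict.contains_insert, hx]
        · rw [if_neg hp]
          exact foldl_pres (fun d => d.contains x = true) (pvVisitB m f)
            (fun b a hb => ih b a x hb) (pvLookup m (pvPart n).2) (res.insert n false)
            (by simp [PySem.Dict.contains_insert, hx])

lemma pvFiltMono (res res' : PySem.Dict String Bool)
    (h : ∀ x, res.contains x = true → res'.contains x = true) :
    ∀ l : List String,
      (l.filter (fun x => !(res'.contains x))).length ≤ (l.filter (fun x => !(res.contains x))).length := by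
  intro l
  induction l with
  | nil => simp
  | cons y ys ih =>
      simp only [List.filter_cons]
      cases hy : res.contains y with
      | true =>
          rw [if_neg (by simp [h y hy]), if_neg (by simp [hy])]
          exact ih
      | false =>
          cases hy' : res'.contains y with
          | true =>
              rw [if_neg (by simp [hy']), if_pos (by simp [hy])]
              simp only [List.length_cons]
              omega
          | false =>
              rw [if_pos (by simp [hy']), if_pos (by simp [hy])]
              simp only [List.length_cons]
              omega

lemma unvis_mono (m : List (String × List String)) (res res' : PySem.Dict String Bool)
    (h : ∀ x, res.contains x = true → res'.contains x = true) :
    pvUnvis m res' ≤ pvUnvis m res :=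
  pvFiltMono res res' h _

lemma unvis_insert_le (m : List (String × List String)) (res : PySem.Dict String Bool)
    (n : String) (v : Bool) : pvUnvis m (res.insert n v) ≤ pvUnvis m res :=
  unvis_mono m res _ (fun x hx => by simp [PySem.Dict.contains_insert, hx])

lemma unvis_insert_lt (m : List (String × List String)) (res : PySem.Dict String Bool)
    (n : String) (v : Bool) (hn : n ∈ pvAllVals m) (hc : res.contains n = false) :
    pvUnvis m (res.insert n v) < pvUnvis m res := by
  have hmono := pvFiltMono res (res.insert n v)
    (fun x hx => by simp [PySem.Dict.contains_insert, hx])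
  have key : ∀ l : List String, n ∈ l →
      (l.filter (fun x => !((res.insert n v).contains x))).length
        < (l.filter (fun x => !(res.contains x))).length := by
    intro l
    induction l with
    | nil => intro h; cases h
    | cons y ys ih =>
        intro hl
        simp only [List.filter_cons]
        rcases List.mem_cons.mp hl with hl | hl
        · subst hl
          rw [if_neg (by simp [PySem.Dict.contains_insert]), if_pos (by simp [hc])]
          have := hmono ys
          simp only [List.length_cons]
          omega
        · have htail := ih hl
          cases hy : (res.insert n v).contains y with
          | true =>
              cases hy' : res.contains y with
              | true =>
                  rw [if_neg (by simp [hy]), if_neg (by simp [hy'])]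
                  exact htail
              | false =>
                  rw [if_neg (by simp [hy]), if_pos (by simp [hy'])]
                  simp only [List.length_cons]
                  omega
          | false =>
              have hy' : res.contains y = false := by
                have h2 := PySem.Dict.contains_insert (d := res) (k := n) (v := v) (k' := y)
                rw [hy] at h2
                cases h3 : res.contains y with
                | true => rw [h3] at h2; simp at h2
                | false => rfl
              rw [if_pos (by simp [hy]), if_pos (by simp [hy'])]
              simp only [List.length_cons]
              omega
  exact key _ (List.mem_dedup.mpr hn)

lemma visitB_unvis_le (m : List (String × List String)) (f : Nat)
    (res : PySem.Dict String Bool) (n : String) :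
    pvUnvis m (pvVisitB m f res n) ≤ pvUnvis m res :=
  unvis_mono m res _ (fun x hx => visitB_contains_mono m f res n x hx)

lemma foldl_visitB_unvis_le (m : List (String × List String)) (f : Nat)
    (l : List String) (res : PySem.Dict String Bool) :
    pvUnvis m (l.foldl (pvVisitB m f) res) ≤ pvUnvis m res := by
  induction l generalizing res with
  | nil => simp
  | cons x xs ih =>
      simp only [List.foldl_cons]
      exact le_trans (ih _) (visitB_unvis_le m f res x)

lemma foldl_congr_fuel (m : List (String × List String)) (f g j : Nat)
    (H : ∀ res n, n ∈ pvAllVals m → pvUnvis m res ≤ j → pvVisitB m f res n = pvVisitB m g res n) :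
    ∀ (l : List String) (res : PySem.Dict String Bool),
      (∀ x ∈ l, x ∈ pvAllVals m) → pvUnvis m res ≤ j →
      l.foldl (pvVisitB m f) res = l.foldl (pvVisitB m g) res := by
  intro l
  induction l with
  | nil => intro res _ _; rfl
  | cons x xs ih =>
      intro res hsub hres
      simp only [List.foldl_cons]
      rw [H res x (hsub x List.mem_cons_self) hres]
      exact ih _ (fun y hy => hsub y (List.mem_cons_of_mem _ hy))
        (le_trans (visitB_unvis_le m g res x) hres)

lemma visitB_fuel (m : List (String × List String)) :
    ∀ (k f g : Nat) (res : PySem.Dict String Bool) (n : String),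
      n ∈ pvAllVals m → pvUnvis m res ≤ k → k < f → k < g →
      pvVisitB m f res n = pvVisitB m g res n := by
  intro k
  induction k using Nat.strong_induction_on with
  | _ k ih =>
      intro f g res n hn hres hf hg
      obtain ⟨f', rfl⟩ : ∃ f', f = f' + 1 := ⟨f - 1, by omega⟩
      obtain ⟨g', rfl⟩ : ∃ g', g = g' + 1 := ⟨g - 1, by omega⟩
      simp only [pvVisitB]
      cases hc : res.contains n with
      | true => rw [if_pos rfl, if_pos rfl]
      | false =>
          rw [if_neg Bool.false_ne_true, if_neg Bool.false_ne_true]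
          by_cases hp : (pvPart n).2 = ""
          · rw [if_pos hp, if_pos hp]
          · rw [if_neg hp, if_neg hp]
            have hlt := unvis_insert_lt m res n false hn hc
            have hk1 : 1 ≤ k := by omega
            have hres1 : pvUnvis m (res.insert n false) ≤ k - 1 := by omega
            exact foldl_congr_fuel m f' g' (k - 1)
              (fun res2 n2 hn2 hres2 => ih (k - 1) (by omega) f' g' res2 n2 hn2 hres2
                (by omega) (by omega))
              (pvLookup m (pvPart n).2) (res.insert n false)
              (pvLookup_subset m (pvPart n).2) hres1

lemma bridge (m : List (String × List String)) :
    ∀ (fa : Nat) (k fb : Nat) (deq : List String) (res : PySem.Dict String Bool),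
      (∀ x ∈ deq, x ∈ pvAllVals m) → pvUnvis m res ≤ k →
      deq.length + k * (pvSz m + 1) ≤ fa → k < fb →
      pvLoopA m fa deq res = deq.foldl (pvVisitB m fb) res := by
  intro fa
  induction fa with
  | zero =>
      intro k fb deq res _ _ hfuel _
      have : deq = [] := by
        cases deq with
        | nil => rfl
        | cons x xs => simp at hfuel
      subst this
      rfl
  | succ fa ih =>
      intro k fb deq res hsub hres hfuel hfb
      cases deq with
      | nil => rfl
      | cons n rest =>
          obtain ⟨fb', rfl⟩ : ∃ fb', fb = fb' + 1 := ⟨fb - 1, by omega⟩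
          have hrest : ∀ x ∈ rest, x ∈ pvAllVals m :=
            fun x hx => hsub x (List.mem_cons_of_mem _ hx)
          have hn : n ∈ pvAllVals m := hsub n List.mem_cons_self
          simp only [pvLoopA, List.foldl_cons, pvVisitB]
          cases hc : res.contains n with
          | true =>
              rw [if_pos rfl, if_pos rfl]
              exact ih k (fb' + 1) rest res hrest hres (by simp at hfuel; omega) hfb
          | false =>
              rw [if_neg Bool.false_ne_true, if_neg Bool.false_ne_true]
              have hlt := unvis_insert_lt m res n false hn hc
              have hk1 : 1 ≤ k := by omega
              have hres1 : pvUnvis m (res.insert n false) ≤ k - 1 := by omega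
              by_cases hp : (pvPart n).2 = ""
              · rw [if_pos hp, if_pos hp]
                have hres2 : pvUnvis m ((res.insert n false).insert (pvPart n).1 true) ≤ k - 1 :=
                  le_trans (unvis_insert_le m _ _ _) hres1
                exact ih (k - 1) (fb' + 1) rest _ hrest hres2
                  (by
                    have hmul : (k - 1) * (pvSz m + 1) ≤ k * (pvSz m + 1) :=
                      Nat.mul_le_mul_right _ (Nat.sub_le k 1)
                    simp only [List.length_cons] at hfuel
                    omega)
                  (by omega)
              · rw [if_neg hp, if_neg hp]
                have hchild := pvLookup_subset m (pvPart n).2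
                have hclen := pvLookup_length_le m (pvPart n).2
                have hboth : ∀ x ∈ pvLookup m (pvPart n).2 ++ rest, x ∈ pvAllVals m := by
                  intro x hx
                  rcases List.mem_append.mp hx with hx | hx
                  · exact hchild x hx
                  · exact hrest x hx
                have hfuel' : (pvLookup m (pvPart n).2 ++ rest).length + (k - 1) * (pvSz m + 1) ≤ fa := by
                  simp only [List.length_append, List.length_cons] at hfuel ⊢
                  have hexp : (k - 1) * (pvSz m + 1) + (pvSz m + 1) = k * (pvSz m + 1) := by
                    have hk : k - 1 + 1 = k := by omega
                    calc (k - 1) * (pvSz m + 1) + (pvSz m + 1) = ((k - 1) + 1) * (pvSz m + 1) := by ring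
                      _ = k * (pvSz m + 1) := by rw [hk]
                  omega
                rw [ih (k - 1) fb' (pvLookup m (pvPart n).2 ++ rest) (res.insert n false)
                      hboth hres1 hfuel' (by omega)]
                rw [List.foldl_append]
                exact foldl_congr_fuel m fb' (fb' + 1) (k - 1)
                  (fun res2 n2 hn2 hres2 =>
                    visitB_fuel m (k - 1) fb' (fb' + 1) res2 n2 hn2 hres2 (by omega) (by omega))
                  rest _ hrest
                  (le_trans (foldl_visitB_unvis_le m fb' _ _) hres1)

-- ===== coupling pvVisitB (dict of bools) with pvVisit (seen set + output list) =====

-- pvSplit1 against the takeWhile/dropWhile decomposition used by pvPart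
lemma split1_none : ∀ cs : List Char, pvSplit1 cs = none →
    cs.takeWhile (fun c => c ≠ '=') = cs ∧ cs.dropWhile (fun c => c ≠ '=') = [] := by
  intro cs
  induction cs with
  | nil => intro _; exact ⟨rfl, rfl⟩
  | cons c rest ih =>
      intro h
      simp only [pvSplit1] at h
      by_cases hc : c = '='
      · rw [if_pos hc] at h; cases h
      · rw [if_neg hc] at h
        have hrest : pvSplit1 rest = none := by
          cases hr : pvSplit1 rest with
          | none => rfl
          | some p => rw [hr] at h; cases h
        obtain ⟨h1, h2⟩ := ih hrest
        constructor
        · rw [List.takeWhile_cons, if_pos (by simpa using hc), h1]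
        · rw [List.dropWhile_cons, if_pos (by simpa using hc), h2]

lemma split1_some : ∀ (cs s r : List Char), pvSplit1 cs = some (s, r) →
    cs.takeWhile (fun c => c ≠ '=') = s ∧ (cs.dropWhile (fun c => c ≠ '=')).drop 1 = r
      ∧ '=' ∉ s ∧ '=' ∈ cs := by
  intro cs
  induction cs with
  | nil => intro s r h; cases h
  | cons c rest ih =>
      intro s r h
      simp only [pvSplit1] at h
      by_cases hc : c = '='
      · rw [if_pos hc] at h
        obtain ⟨h1, h2⟩ : s = [] ∧ r = rest := by
          cases h; exact ⟨rfl, rfl⟩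
        subst h1; subst h2; subst hc
        refine ⟨?_, ?_, by simp, by simp⟩
        · rw [List.takeWhile_cons, if_neg (by simp)]
        · rw [List.dropWhile_cons, if_neg (by simp)]; simp
      · rw [if_neg hc] at h
        cases hr : pvSplit1 rest with
        | none => rw [hr] at h; cases h
        | some p =>
            obtain ⟨s', r'⟩ := p
            rw [hr] at h
            simp only [Option.map_some, Option.some_inj, Prod.mk.injEq] at h
            obtain ⟨h1, h2⟩ := h
            subst h1; subst h2
            obtain ⟨g1, g2, g3, g4⟩ := ih s' r' hr
            refine ⟨?_, ?_, ?_, List.mem_cons_of_mem _ g4⟩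
            · rw [List.takeWhile_cons, if_pos (by simpa using hc), g1]
            · rw [List.dropWhile_cons, if_pos (by simpa using hc), g2]
            · intro hmem
              rcases List.mem_cons.mp hmem with hmem | hmem
              · exact hc hmem.symm
              · exact g3 hmem

lemma ofList_eq_empty_iff (cs : List Char) : String.ofList cs = "" ↔ cs = [] := by
  constructor
  · intro h
    have := congrArg String.toList h
    simpa using this
  · intro h; subst h; rfl

lemma pvPart_of_none (n : String) (h : pvSplit1 n.toList = none) : pvPart n = (n, "") := by
  obtain ⟨h1, h2⟩ := split1_none n.toList h
  simp only [ne_eq, decide_not] at h1 h2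
  simp [pvPart, h1, h2]

lemma pvPart_of_some (n : String) (s r : List Char) (h : pvSplit1 n.toList = some (s, r)) :
    pvPart n = (String.ofList s, String.ofList r) := by
  obtain ⟨h1, h2, _, _⟩ := split1_some n.toList s r h
  simp only [ne_eq, decide_not] at h1 h2
  simp [pvPart, h1, h2]

lemma lookup_getD (m : List (String × List String)) (key : String) :
    (PySem.Dict.mk m).getD key [] = pvLookup m key := by
  induction m with
  | nil => rfl
  | cons p rest ih =>
      obtain ⟨k, v⟩ := p
      simp only [pvLookup]
      rw [PySem.Dict.getD_eq_get?_getD, PySem.Dict.get?_mk_cons]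
      by_cases h : k == key
      · rw [if_pos h, if_pos h]; rfl
      · rw [if_neg h, if_neg h, ← ih, PySem.Dict.getD_eq_get?_getD]

-- the coupling invariant between A's dict state and B's (seen, out) state
def pvInv (res : PySem.Dict String Bool) (st : PySem.Set String × List String) : Prop :=
  res.keys.Nodup ∧
  (∀ x, res.contains x = true ↔ x ∈ st.1) ∧
  (res.items.filter (fun p => p.2)).map (·.1) = st.2 ∧
  (∀ p ∈ res.items, p.2 = false → '=' ∈ p.1.toList)

lemma foldl_inv {α σ τ : Type} (P : σ → τ → Prop) (f : σ → α → σ) (g : τ → α → τ)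
    (h : ∀ s t a, P s t → P (f s a) (g t a)) :
    ∀ (l : List α) (s : σ) (t : τ), P s t → P (l.foldl f s) (l.foldl g t) := by
  intro l
  induction l with
  | nil => intro s t hst; exact hst
  | cons x xs ih => intro s t hst; exact ih _ _ (h s t x hst)

lemma couple (m : List (String × List String)) :
    ∀ (f : Nat) (res : PySem.Dict String Bool) (st : PySem.Set String × List String) (n : String),
      pvInv res st → pvInv (pvVisitB m f res n) (pvVisit m f st n) := by
  intro f
  induction f with
  | zero => intro res st n h; exact h
  | succ f ih =>
      intro res st n h
      obtain ⟨hnd, hcont, hout, hfalse⟩ := h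
      obtain ⟨seen, out⟩ := st
      simp only [pvVisitB, pvVisit]
      by_cases hc : res.contains n = true
      · have hmem : n ∈ seen := (hcont n).mp hc
        rw [if_pos hc, if_pos ((PySem.Set.contains_iff seen n).mpr hmem)]
        exact ⟨hnd, hcont, hout, hfalse⟩
      · have hnotmem : ¬ (PySem.Set.contains seen n = true) := by
          intro hx
          exact hc ((hcont n).mpr ((PySem.Set.contains_iff seen n).mp hx))
        rw [if_neg hc, if_neg hnotmem]
        have hc' : res.contains n = false := by
          cases h : res.contains n with
          | true => exact absurd h hc
          | false => rfl
        -- the state after res[n] = False / seen.add(n)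
        have hitems1 : (res.insert n false).items = res.items ++ [(n, false)] :=
          PySem.Dict.items_insert_of_not_contains res false hc'
        have hnd1 : (res.insert n false).keys.Nodup := PySem.Dict.nodup_keys_insert res n false hnd
        have hcont1 : ∀ x, (res.insert n false).contains x = true ↔ x ∈ PySem.Set.add seen n := by
          intro x
          rw [PySem.Dict.contains_insert, PySem.Set.mem_add]
          constructor
          · intro hx
            rcases Bool.or_eq_true_iff.mp hx with hx | hx
            · exact Or.inr (by simpa using hx)
            · exact Or.inl ((hcont x).mp hx)
          · intro hx
            rcases hx with hx | hx
            · exact Bool.or_eq_true_iff.mpr (Or.inr ((hcont x).mpr hx))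
            · exact Bool.or_eq_true_iff.mpr (Or.inl (by simpa using hx))
        have hout1 : ((res.insert n false).items.filter (fun p => p.2)).map (·.1) = out := by
          rw [hitems1, List.filter_append]
          simpa using hout
        cases hsp : pvSplit1 n.toList with
        | none =>
            -- no '=': n itself becomes a parsed scope, emitted at its own position
            dsimp only
            have hpart := pvPart_of_none n hsp
            have hp2 : (pvPart n).2 = "" := by rw [hpart]
            have hp1 : (pvPart n).1 = n := by rw [hpart]
            rw [if_pos hp2, hp1, PySem.Dict.insert_insert_self res n false true]
            have hitems2 : (res.insert n true).items = res.items ++ [(n, true)] :=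
              PySem.Dict.items_insert_of_not_contains res true hc'
            refine ⟨PySem.Dict.nodup_keys_insert res n true hnd, ?_, ?_, ?_⟩
            · intro x
              rw [PySem.Dict.contains_insert, PySem.Set.mem_add]
              constructor
              · intro hx
                rcases Bool.or_eq_true_iff.mp hx with hx | hx
                · exact Or.inr (by simpa using hx)
                · exact Or.inl ((hcont x).mp hx)
              · intro hx
                rcases hx with hx | hx
                · exact Bool.or_eq_true_iff.mpr (Or.inr ((hcont x).mpr hx))
                · exact Bool.or_eq_true_iff.mpr (Or.inl (by simpa using hx))
            · rw [hitems2, List.filter_append, List.map_append, hout]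
              simp
            · intro p hp hpf
              rw [hitems2] at hp
              rcases List.mem_append.mp hp with hp | hp
              · exact hfalse p hp hpf
              · simp at hp
                rw [hp] at hpf
                cases hpf
        | some pr =>
            obtain ⟨s, r⟩ := pr
            dsimp only
            have hpart := pvPart_of_some n s r hsp
            obtain ⟨-, -, hs_noeq, hn_eq⟩ := split1_some n.toList s r hsp
            by_cases hr : r = []
            · -- ref empty ("scope=" shape): A sets res[scope] = True
              subst hr
              have hp2 : (pvPart n).2 = "" := by rw [hpart]
              have hp1 : (pvPart n).1 = String.ofList s := by rw [hpart]
              rw [if_pos hp2, hp1, if_neg (by simp : ¬ (([] : List Char) ≠ []))]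
              have hscope_noeq : '=' ∉ (String.ofList s).toList := by simpa using hs_noeq
              have hscope_ne_n : String.ofList s ≠ n := by
                intro hEq
                rw [hEq] at hscope_noeq
                exact hscope_noeq hn_eq
              by_cases hsc : (res.insert n false).contains (String.ofList s) = true
              · -- scope already present: its value is True by the invariant, overwrite is a no-op
                rw [if_pos ((PySem.Set.contains_iff _ _).mpr ((hcont1 _).mp hsc))]
                have hval : ∀ p ∈ (res.insert n false).items, p.1 = String.ofList s →
                    p = (String.ofList s, true) := by
                  intro p hp hpk
                  obtain ⟨p1, p2⟩ := p
                  simp only at hpk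
                  subst hpk
                  cases p2 with
                  | false =>
                      exfalso
                      rw [hitems1] at hp
                      rcases List.mem_append.mp hp with hp | hp
                      · exact hscope_noeq (hfalse _ hp rfl)
                      · simp at hp
                        exact hscope_ne_n hp
                  | true => rfl
                have hitems2 : ((res.insert n false).insert (String.ofList s) true).items
                    = (res.insert n false).items := by
                  rw [PySem.Dict.items_insert_of_contains _ true hsc]
                  calc ((res.insert n false).items.map
                          (fun p => if (p.1 == String.ofList s) = true then (String.ofList s, true) else p))
                      = (res.insert n false).items.map id := by
                        apply List.map_congr_left
                        intro p hp
                        simp only [id]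
                        by_cases hpk : (p.1 == String.ofList s) = true
                        · rw [if_pos hpk, hval p hp (by simpa using hpk)]
                        · rw [if_neg hpk]
                    _ = (res.insert n false).items := List.map_id _
                refine ⟨PySem.Dict.nodup_keys_insert _ (String.ofList s) true hnd1, ?_, ?_, ?_⟩
                · intro x
                  rw [PySem.Dict.contains_insert]
                  constructor
                  · intro hx
                    rcases Bool.or_eq_true_iff.mp hx with hx | hx
                    · have hxs : x = String.ofList s := by simpa using hx
                      subst hxs
                      exact (hcont1 _).mp hsc
                    · exact (hcont1 x).mp hx
                  · intro hx
                    exact Bool.or_eq_true_iff.mpr (Or.inr ((hcont1 x).mpr hx))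
                · rw [hitems2]
                  exact hout1
                · intro p hp hpf
                  rw [hitems2, hitems1] at hp
                  rcases List.mem_append.mp hp with hp | hp
                  · exact hfalse p hp hpf
                  · simp [Prod.ext_iff] at hp
                    rw [hp.1]
                    exact hn_eq
              · -- scope fresh: appended as True and emitted
                have hsc' : (res.insert n false).contains (String.ofList s) = false := by
                  cases h : (res.insert n false).contains (String.ofList s) with
                  | true => exact absurd h hsc
                  | false => rfl
                have hmemsc : (String.ofList s) ∉ PySem.Set.add seen n := by
                  intro hx
                  exact hsc ((hcont1 _).mpr hx)
                rw [if_neg (fun hx => hmemsc ((PySem.Set.contains_iff _ _).mp hx))]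
                have hitems2 : ((res.insert n false).insert (String.ofList s) true).items
                    = (res.insert n false).items ++ [(String.ofList s, true)] :=
                  PySem.Dict.items_insert_of_not_contains _ true hsc'
                refine ⟨PySem.Dict.nodup_keys_insert _ (String.ofList s) true hnd1, ?_, ?_, ?_⟩
                · intro x
                  rw [PySem.Dict.contains_insert, PySem.Set.mem_add]
                  constructor
                  · intro hx
                    rcases Bool.or_eq_true_iff.mp hx with hx | hx
                    · exact Or.inr (by simpa using hx)
                    · exact Or.inl ((hcont1 x).mp hx)
                  · intro hx
                    rcases hx with hx | hx
                    · exact Bool.or_eq_true_iff.mpr (Or.inr ((hcont1 x).mpr hx))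
                    · exact Bool.or_eq_true_iff.mpr (Or.inl (by simpa using hx))
                · rw [hitems2, List.filter_append, List.map_append, hout1]
                  simp
                · intro p hp hpf
                  rw [hitems2, hitems1] at hp
                  rcases List.mem_append.mp hp with hp | hp
                  · rcases List.mem_append.mp hp with hp | hp
                    · exact hfalse p hp hpf
                    · simp [Prod.ext_iff] at hp
                      rw [hp.1]
                      exact hn_eq
                  · simp [Prod.ext_iff] at hp
                    simp [hp.2] at hpf
            · -- ref nonempty: both sides recurse over the same children
              have hp2 : (pvPart n).2 ≠ "" := by
                rw [hpart]
                simpa [ofList_eq_empty_iff] using hr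
              rw [if_neg hp2, if_pos hr,
                  show (pvPart n).2 = String.ofList r from by rw [hpart], lookup_getD]
              exact foldl_inv pvInv (pvVisitB m f) (pvVisit m f)
                (fun s' t' a h' => ih s' t' a h')
                (pvLookup m (String.ofList r)) (res.insert n false) (PySem.Set.add seen n, out)
                ⟨hnd1, hcont1, hout1, by
                  intro p hp hpf
                  rw [hitems1] at hp
                  rcases List.mem_append.mp hp with hp | hp
                  · exact hfalse p hp hpf
                  · simp [Prod.ext_iff] at hp
                    rw [hp.1]
                    exact hn_eq⟩

-- ===== VERDICT (by name: the statement is the Claim_ definition above) =====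
theorem resolve_magika_label_with_syntax_map_spec : Claim_equal_resolve_magika_label_with_syntax_map := by
  intro label m _
  unfold Spec_resolve_magika_label_with_syntax_map
  unfold resolve_magika_label_with_syntax_map resolve_magika_label_with_syntax_map_alt
  have hsub := pvLookup_subset m label
  have hk : pvUnvis m PySem.Dict.empty ≤ pvSz m := by
    unfold pvUnvis pvSz
    calc ((pvAllVals m).dedup.filter _).length ≤ (pvAllVals m).dedup.length := List.length_filter_le _ _
      _ ≤ (pvAllVals m).length := (List.dedup_sublist _).length_le
  have hfuel : (pvLookup m label).length + pvUnvis m PySem.Dict.empty * (pvSz m + 1)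
      ≤ pvSz m + pvSz m * (pvSz m + 1) :=
    Nat.add_le_add (pvLookup_length_le m label) (Nat.mul_le_mul_right _ hk)
  rw [bridge m _ (pvUnvis m PySem.Dict.empty) (pvSz m + 1) _ _ hsub le_rfl hfuel
        (Nat.lt_succ_of_le hk), lookup_getD]
  have hInv0 : pvInv PySem.Dict.empty (PySem.Set.empty, []) := by
    refine ⟨by simp [PySem.Dict.nodup_keys_empty], ?_, rfl, ?_⟩
    · intro x
      simp [PySem.Dict.contains_empty, PySem.Set.empty]
    · intro p hp
      simp [PySem.Dict.empty] at hp
  have h := foldl_inv pvInv (pvVisitB m (pvSz m + 1)) (pvVisit m (pvSz m + 1))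
    (fun s t a h' => couple m (pvSz m + 1) s t a h')
    (pvLookup m label) PySem.Dict.empty (PySem.Set.empty, []) hInv0
  exact h.2.2.1
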